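-- pv_equiv track=rewrite | github.com/KaseyMarkel/kaseymarkel.github.io | breeding-dashboard/process_bms_data.py | categorize_trait
-- ===== SOURCE A (Python) =====
-- def categorize_trait(study_name, study_obs):
--     """Categorize study by biofortification trait"""
--     has_zinc = any(o.get('observationVariableName', '') in ['Zinc_sn', 'Zn_ppm', 'Zn_manual'] for o in study_obs)
--     has_qpm = any(o.get('observationVariableName', '') in ['Trp_sn', 'Lys_sn', 'Trp_manual', 'Lys_manual'] for o in study_obs)
--
--     name = (study_name or '').lower()
--
--     if has_zinc and has_qpm:
--         return 'Zn+QPM'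
--     elif has_zinc or 'zinc' in name or 'zn' in name:
--         return 'Zn'
--     elif has_qpm or 'qpm' in name or 'tryptophan' in name or 'lisina' in name:
--         return 'QPM'
--     return 'Conventional'
-- ===== SOURCE B (Python) =====
-- TRAIT_BIT = {
--     'Zinc_sn': 1, 'Zn_ppm': 1, 'Zn_manual': 1,
--     'Trp_sn': 2, 'Lys_sn': 2, 'Trp_manual': 2, 'Lys_manual': 2,
-- }
--
-- def categorize_trait(study_name, study_obs):
--     """Categorize study by biofortification trait (single-pass bitmask version)."""
--     mask = 0
--     for o in study_obs:
--         mask |= TRAIT_BIT.get(o.get('observationVariableName', ''), 0)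
--         if mask == 3:
--             break
--     name = (study_name or '').lower()
--     if mask == 3:
--         return 'Zn+QPM'
--     if mask & 1 or 'zinc' in name or 'zn' in name:
--         return 'Zn'
--     if mask & 2 or any(w in name for w in ('qpm', 'tryptophan', 'lisina')):
--         return 'QPM'
--     return 'Conventional'
-- ===== Notes on version B (the rewrite author's own statement) =====
-- stated objective: alternative
-- what changed: B replaces A's two separate any()-scans over the observations by ONE fused pass that folds a 2-bit trait mask via a name->bit lookup table with early exit once both bits are set, then decides from the mask.
import Mathlib
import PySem

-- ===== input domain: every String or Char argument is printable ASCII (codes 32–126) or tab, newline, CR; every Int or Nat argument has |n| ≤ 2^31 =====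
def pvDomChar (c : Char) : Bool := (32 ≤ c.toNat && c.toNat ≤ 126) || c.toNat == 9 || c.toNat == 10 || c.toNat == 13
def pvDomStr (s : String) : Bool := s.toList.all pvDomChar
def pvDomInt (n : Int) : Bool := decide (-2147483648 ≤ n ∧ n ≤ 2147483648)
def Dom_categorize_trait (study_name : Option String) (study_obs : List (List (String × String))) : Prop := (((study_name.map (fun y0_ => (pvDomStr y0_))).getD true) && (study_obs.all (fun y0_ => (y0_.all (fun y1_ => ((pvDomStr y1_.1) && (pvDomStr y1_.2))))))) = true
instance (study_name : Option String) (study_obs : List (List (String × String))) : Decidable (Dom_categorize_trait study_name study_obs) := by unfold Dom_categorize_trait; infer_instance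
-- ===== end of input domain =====

-- B fuses A's two any() scans into ONE pass that folds a 2-bit trait mask through a
-- name→bit lookup table (early exit once both bits are set), then decides from the mask.

-- ===== PORT A =====
-- o.get('observationVariableName', '')
def pvGetName (o : List (String × String)) : String :=
  (PySem.Dict.mk o).getD "observationVariableName" ""

def categorize_trait (study_name : Option String) (study_obs : List (List (String × String))) : String :=
  let has_zinc := study_obs.any (fun o => ["Zinc_sn", "Zn_ppm", "Zn_manual"].contains (pvGetName o))
  let has_qpm := study_obs.any (fun o => ["Trp_sn", "Lys_sn", "Trp_manual", "Lys_manual"].contains (pvGetName o))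
  let name := PySem.Str.lower (study_name.getD "")   -- (study_name or '').lower(); '' when None or ''
  if has_zinc && has_qpm then "Zn+QPM"
  else if has_zinc || PySem.Str.isIn "zinc" name || PySem.Str.isIn "zn" name then "Zn"
  else if has_qpm || PySem.Str.isIn "qpm" name || PySem.Str.isIn "tryptophan" name || PySem.Str.isIn "lisina" name then "QPM"
  else "Conventional"

-- ===== PORT B =====
-- TRAIT_BIT module constant
def pvTraitBit : PySem.Dict String Nat :=
  PySem.Dict.mk [("Zinc_sn", 1), ("Zn_ppm", 1), ("Zn_manual", 1),
                 ("Trp_sn", 2), ("Lys_sn", 2), ("Trp_manual", 2), ("Lys_manual", 2)]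

-- the for-loop: mask |= TRAIT_BIT.get(o.get('observationVariableName',''), 0); break when mask == 3
def pvMaskLoop : List (List (String × String)) → Nat → Nat
  | [], m => m
  | o :: rest, m =>
    let m' := m ||| pvTraitBit.getD (pvGetName o) 0
    if m' == 3 then m' else pvMaskLoop rest m'

def categorize_trait_alt (study_name : Option String) (study_obs : List (List (String × String))) : String :=
  let mask := pvMaskLoop study_obs 0
  let name := PySem.Str.lower (study_name.getD "")
  if mask == 3 then "Zn+QPM"
  else if (mask &&& 1) != 0 || PySem.Str.isIn "zinc" name || PySem.Str.isIn "zn" name then "Zn"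
  else if (mask &&& 2) != 0 || ["qpm", "tryptophan", "lisina"].any (fun w => PySem.Str.isIn w name) then "QPM"
  else "Conventional"

-- ===== PRECONDITION & SPEC =====
def Spec_categorize_trait (study_name : Option String) (study_obs : List (List (String × String))) (out : String) : Prop := out = categorize_trait_alt study_name study_obs
instance (study_name : Option String) (study_obs : List (List (String × String))) (out : String) : Decidable (Spec_categorize_trait study_name study_obs out) := by unfold Spec_categorize_trait; infer_instance

-- ===== CLAIM =====
def Claim_equal_categorize_trait : Prop := ∀ (study_name : Option String) (study_obs : List (List (String × String))), Dom_categorize_trait study_name study_obs → Spec_categorize_trait study_name study_obs (categorize_trait study_name study_obs)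

-- ===== LEMMAS AND PROOFS =====

-- the table lookup: 1 on zinc names, 2 on QPM names, 0 otherwise
theorem pvTraitBit_eq (s : String) :
    pvTraitBit.getD s 0 =
      (if s ∈ ["Zinc_sn", "Zn_ppm", "Zn_manual"] then 1
       else if s ∈ ["Trp_sn", "Lys_sn", "Trp_manual", "Lys_manual"] then 2 else 0) := by
  simp only [pvTraitBit, PySem.Dict.getD, PySem.Dict.get?_mk_cons, List.mem_cons,
    List.not_mem_nil, or_false, beq_iff_eq]
  split_ifs <;> simp_all [PySem.Dict.get?, List.find?, eq_comm]

-- the fused loop computes exactly the lor of A's two any-flags (1 for zinc, 2 for QPM)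
set_option maxHeartbeats 1000000 in
theorem pvMaskLoop_eq (obs : List (List (String × String))) : ∀ (m : Nat), m < 4 →
    pvMaskLoop obs m =
      ((m ||| (if obs.any (fun o => ["Zinc_sn", "Zn_ppm", "Zn_manual"].contains (pvGetName o)) then 1 else 0)) |||
        (if obs.any (fun o => ["Trp_sn", "Lys_sn", "Trp_manual", "Lys_manual"].contains (pvGetName o)) then 2 else 0)) := by
  induction obs with
  | nil => intro m _; simp [pvMaskLoop]
  | cons o rest ih =>
    intro m hm
    by_cases hz : pvGetName o ∈ ["Zinc_sn", "Zn_ppm", "Zn_manual"] <;>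
      by_cases hq : pvGetName o ∈ ["Trp_sn", "Lys_sn", "Trp_manual", "Lys_manual"] <;>
        [skip; skip; skip; skip]
    · -- impossible: the two key groups are disjoint
      simp only [List.mem_cons, List.not_mem_nil, or_false] at hz hq
      rcases hz with h | h | h <;> rcases hq with h' | h' | h' | h' <;> simp_all
    all_goals
      have hz' : (["Zinc_sn", "Zn_ppm", "Zn_manual"].contains (pvGetName o)) = decide (pvGetName o ∈ ["Zinc_sn", "Zn_ppm", "Zn_manual"]) := by simp
    all_goals
      have hq' : (["Trp_sn", "Lys_sn", "Trp_manual", "Lys_manual"].contains (pvGetName o)) = decide (pvGetName o ∈ ["Trp_sn", "Lys_sn", "Trp_manual", "Lys_manual"]) := by simp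
    all_goals
      have hb := pvTraitBit_eq (pvGetName o)
    all_goals
      simp only [hz, hq, if_true, if_false, decide_true, decide_false] at hb hz' hq'
    all_goals
      simp only [pvMaskLoop, List.any_cons, hb, hz', hq', Bool.true_or, Bool.false_or]
    all_goals
      interval_cases m <;>
        cases hrz : rest.any (fun o => ["Zinc_sn", "Zn_ppm", "Zn_manual"].contains (pvGetName o)) <;>
          cases hrq : rest.any (fun o => ["Trp_sn", "Lys_sn", "Trp_manual", "Lys_manual"].contains (pvGetName o)) <;>
            simp only [hrz, hrq] at ih ⊢ <;>
              first
                | decide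
                | (norm_num at ih ⊢; try rw [ih]; all_goals decide)
    all_goals decide

-- ===== VERDICT =====
theorem categorize_trait_spec : Claim_equal_categorize_trait := by
  intro sn obs _
  unfold Spec_categorize_trait categorize_trait categorize_trait_alt
  rw [pvMaskLoop_eq obs 0 (by decide)]
  rcases hz : obs.any (fun o => ["Zinc_sn", "Zn_ppm", "Zn_manual"].contains (pvGetName o)) <;>
    rcases hq : obs.any (fun o => ["Trp_sn", "Lys_sn", "Trp_manual", "Lys_manual"].contains (pvGetName o)) <;>
      simp [or_assoc]
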